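-- pv_equiv track=rewrite | github.com/pypi-data/pypi-mirror-119 | packages/marco/marco-0.1.2-py3-none-any.whl/src/marco/quantitative.py | quantitative_class
-- ===== SOURCE A (Python) =====
-- from typing import List, Dict, Tuple
-- from numbers import Real
--
-- QuantitativeClass = List[Tuple[Real, Real]]
--
-- def quantitative_class(
--     data: List[Real], interval: int, class_amount: int
-- ) -> QuantitativeClass:
--     tuples_list = []
--     lower_limit = data[0]
--     for _ in range(class_amount):
--         upper_limit = lower_limit + interval
--         tuples_list.append((lower_limit, upper_limit))
--         lower_limit += interval
--
--     return tuples_list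
-- ===== SOURCE B (Python) =====
-- def quantitative_class(data, interval, class_amount):
--     # build the class_amount+1 boundary points, then pair consecutive ones
--     base = data[0]
--     bounds = [base + i * interval for i in range(class_amount + 1)]
--     return list(zip(bounds, bounds[1:]))
-- ===== Notes on version B (the rewrite author's own statement) =====
-- stated objective: alternative
-- what changed: Instead of A's loop carrying a running lower/upper pair, B computes the class_amount+1 boundary points in closed form (base + i*interval) and zips consecutive boundaries; exact on the integer domain.
import Mathlib
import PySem

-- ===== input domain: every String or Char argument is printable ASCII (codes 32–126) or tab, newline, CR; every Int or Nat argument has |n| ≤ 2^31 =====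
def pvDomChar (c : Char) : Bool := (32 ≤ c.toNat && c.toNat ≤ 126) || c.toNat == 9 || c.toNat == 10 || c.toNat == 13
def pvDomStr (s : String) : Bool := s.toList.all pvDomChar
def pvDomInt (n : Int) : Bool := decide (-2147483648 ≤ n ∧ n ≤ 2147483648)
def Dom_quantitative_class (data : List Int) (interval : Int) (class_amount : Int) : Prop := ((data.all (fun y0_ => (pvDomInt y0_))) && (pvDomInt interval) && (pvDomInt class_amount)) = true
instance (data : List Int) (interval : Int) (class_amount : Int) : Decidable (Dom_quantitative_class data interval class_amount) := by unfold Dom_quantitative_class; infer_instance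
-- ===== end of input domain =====

-- B builds the class_amount+1 boundary points in closed form and zips consecutive
-- boundaries, instead of A's loop carrying a running lower/upper pair; objective: alternative.

-- ===== PORT A =====
def quantitative_class (data : List Int) (interval : Int) (class_amount : Int) : List (Int × Int) :=
  match PySem.List.pyGet? data 0 with
  | none => []   -- data[0] raises IndexError: excluded by Pre_
  | some lower0 =>
    ((PySem.List.pyRange 0 class_amount 1).foldl
      (fun (st : List (Int × Int) × Int) _ =>
        (st.1 ++ [(st.2, st.2 + interval)], st.2 + interval)) ([], lower0)).1

-- ===== PORT B =====
def quantitative_class_alt (data : List Int) (interval : Int) (class_amount : Int) : List (Int × Int) :=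
  match PySem.List.pyGet? data 0 with
  | none => []   -- data[0] raises IndexError: excluded by Pre_
  | some base =>
    let bounds := (PySem.List.pyRange 0 (class_amount + 1) 1).map
      (fun i => base + i * interval)
    bounds.zip (PySem.List.slice bounds (some 1) none)

-- ===== PRECONDITION & SPEC =====
-- Python A raises IndexError on data[0] when data is empty; that is the only exception.
def Pre_quantitative_class (data : List Int) (interval : Int) (class_amount : Int) : Prop := data ≠ []
instance (data : List Int) (interval : Int) (class_amount : Int) : Decidable (Pre_quantitative_class data interval class_amount) := by unfold Pre_quantitative_class; infer_instance
def pvWitness_quantitative_class : List Int × Int × Int := ([3], 5, 4)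

def Spec_quantitative_class (data : List Int) (interval : Int) (class_amount : Int) (out : List (Int × Int)) : Prop := out = quantitative_class_alt data interval class_amount
instance (data : List Int) (interval : Int) (class_amount : Int) (out : List (Int × Int)) : Decidable (Spec_quantitative_class data interval class_amount out) := by unfold Spec_quantitative_class; infer_instance

-- ===== CLAIM (what is proved, stated in full; the proofs are below) =====
def Claim_equal_quantitative_class : Prop := ∀ (data : List Int) (interval : Int) (class_amount : Int), Dom_quantitative_class data interval class_amount → Pre_quantitative_class data interval class_amount → Spec_quantitative_class data interval class_amount (quantitative_class data interval class_amount)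

-- ===== LEMMAS AND PROOFS =====

-- Loop invariant: after n iterations the accumulator is B's closed-form list and the
-- running lower limit is base + n*interval.
theorem qc_loop (base interval : Int) : ∀ (n : Nat),
    (PySem.List.pyRange 0 (n : Int) 1).foldl
      (fun (st : List (Int × Int) × Int) _ =>
        (st.1 ++ [(st.2, st.2 + interval)], st.2 + interval)) ([], base)
    = ((PySem.List.pyRange 0 (n : Int) 1).map
        (fun i => (base + i * interval, base + (i + 1) * interval)),
       base + n * interval) := by
  intro n
  induction n with
  | zero => simp [PySem.List.pyRange_one_eq_nil]
  | succ m ih =>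
    rw [show ((m + 1 : Nat) : Int) = (m : Int) + 1 by push_cast; ring,
        PySem.List.pyRange_one_succ_right (by positivity)]
    simp [List.foldl_append, ih]
    ring

-- Consecutive pairing: zipping the (n+1)-point boundary list with its tail yields
-- exactly the closed-form class intervals.
theorem boundsZip (interval base : Int) (n : Nat) :
    ((List.range (n+1)).map (fun (k : Nat) => base + (k : Int) * interval)).zip
      (((List.range (n+1)).map (fun (k : Nat) => base + (k : Int) * interval)).tail)
    = (List.range n).map (fun (k : Nat) => (base + (k : Int) * interval, base + ((k : Int) + 1) * interval)) := by
  apply List.ext_getElem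
  · simp only [List.length_zip, List.length_tail, List.length_map, List.length_range]
    omega
  · intro k h1 h2
    simp only [List.getElem_zip, List.getElem_tail, List.getElem_map, List.getElem_range,
               Prod.mk.injEq]
    constructor <;> push_cast <;> ring

theorem quantitative_class_eq (data : List Int) (interval : Int) (class_amount : Int) :
    quantitative_class data interval class_amount
      = quantitative_class_alt data interval class_amount := by
  unfold quantitative_class quantitative_class_alt
  cases h : PySem.List.pyGet? data 0 with
  | none => rfl
  | some base =>
    dsimp only
    by_cases hc1 : class_amount + 1 ≤ 0
    · simp [PySem.List.pyRange_one_eq_nil (by omega : class_amount ≤ 0),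
            PySem.List.pyRange_one_eq_nil hc1]
    · obtain ⟨n, hn⟩ : ∃ n : Nat, class_amount = (n : Int) := ⟨class_amount.toNat, by omega⟩
      subst hn
      rw [qc_loop]
      rw [show ((n : Int) + 1) = ((n + 1 : Nat) : Int) by push_cast; ring]
      rw [PySem.List.pyRange_zero_natCast, PySem.List.pyRange_zero_natCast,
          PySem.List.slice_from_one, List.map_map, List.map_map]
      simp only [Function.comp_def]
      exact (boundsZip interval base n).symm

-- ===== VERDICT (by name: the statement is the Claim_ definition above) =====
theorem quantitative_class_spec : Claim_equal_quantitative_class := by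
  intro data interval class_amount _ _
  exact quantitative_class_eq data interval class_amount
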